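-- pv_equiv track=rewrite | github.com/ManInAGarden/ancpicdb | backgroundworkers/BgMassArchivingBase.py | _get_subname_parts
-- ===== SOURCE A (Python) =====
-- def _get_subname_parts(txt : str):
--     if txt is None: return None
--     if len(txt)==0: return txt
--
--     lastupper = True
--     answ = ""
--     for c in txt:
--         if c.isupper():
--             if not lastupper:
--                 answ += " "
--             lastupper = True
--         else:
--             lastupper = False
--
--         answ += c
--
--     lastdigit = txt[0].isdigit()
--     answ2 = ""
--
--     for c in answ:
--         if c.isdigit():
--             if not lastdigit:
--                 answ2 += " "
--             lastdigit = True
--         else: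
--             if lastdigit:
--                 answ2 += " "
--             lastdigit = False
--
--         answ2 += c
--
--     return answ2
-- ===== SOURCE B (Python) =====
-- def _get_subname_parts(txt : str):
--     if txt is None: return None
--     if len(txt) == 0: return txt
--
--     lastupper = True
--     lastdigit = txt[0].isdigit()
--     out = []
--
--     def push(ch):
--         # pass-2 (digit-boundary) logic, applied to each char as pass 1 emits it
--         nonlocal lastdigit
--         if ch.isdigit():
--             if not lastdigit:
--                 out.append(" ")
--             lastdigit = True
--         else:
--             if lastdigit:
--                 out.append(" ")
--             lastdigit = False
--         out.append(ch)
--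
--     for c in txt:
--         if c.isupper():
--             if not lastupper:
--                 push(" ")
--             lastupper = True
--         else:
--             lastupper = False
--         push(c)
--
--     return "".join(out)
-- ===== Notes on version B (the rewrite author's own statement) =====
-- stated objective: alternative
-- what changed: Fuses A's two sequential passes (uppercase-boundary spacing, then digit-boundary spacing over the intermediate string) into a single scan that streams each character pass 1 emits directly through the pass-2 state, never materializing the intermediate string.
import Mathlib
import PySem

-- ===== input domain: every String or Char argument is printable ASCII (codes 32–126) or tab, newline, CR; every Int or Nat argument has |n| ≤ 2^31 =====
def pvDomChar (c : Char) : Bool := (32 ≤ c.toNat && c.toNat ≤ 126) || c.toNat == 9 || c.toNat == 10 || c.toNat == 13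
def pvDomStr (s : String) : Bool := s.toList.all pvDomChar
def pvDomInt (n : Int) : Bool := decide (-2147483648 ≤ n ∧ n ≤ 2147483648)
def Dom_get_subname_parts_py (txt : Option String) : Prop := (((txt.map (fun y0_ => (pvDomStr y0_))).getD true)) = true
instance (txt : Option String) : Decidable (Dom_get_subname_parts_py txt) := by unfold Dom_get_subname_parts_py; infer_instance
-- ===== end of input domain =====

-- B fuses A's two sequential passes into one scan, streaming pass-1's emitted
-- characters through the pass-2 digit-boundary state; same return value (objective: alternative decomposition).

-- ===== PORT A =====
-- pass 1 loop body: upper-case boundary spacing (state: lastupper, answ)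
def pvStep1 (st : Bool × List Char) (c : Char) : Bool × List Char :=
  if PySem.Chars.isupper c then
    (true, (if !st.1 then st.2 ++ [' '] else st.2) ++ [c])
  else
    (false, st.2 ++ [c])

-- pass 2 loop body: digit boundary spacing (state: lastdigit, answ2)
def pvStep2 (st : Bool × List Char) (c : Char) : Bool × List Char :=
  if PySem.Chars.isdigit c then
    (true, (if !st.1 then st.2 ++ [' '] else st.2) ++ [c])
  else
    (false, (if st.1 then st.2 ++ [' '] else st.2) ++ [c])

def get_subname_parts_py (txt : Option String) : Option String :=
  match txt with
  | none => none
  | some s =>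
    if s.toList = [] then some s
    else
      let cs := s.toList
      let answ := (cs.foldl pvStep1 (true, [])).2
      let answ2 := (answ.foldl pvStep2 (PySem.Chars.isdigit (cs.headD ' '), [])).2
      some (String.mk answ2)

-- ===== PORT B =====
-- B's `push`: pass-2 digit logic applied to one emitted character
def pvPush (st : Bool × List Char) (ch : Char) : Bool × List Char :=
  if PySem.Chars.isdigit ch then
    (true, (if !st.1 then st.2 ++ [' '] else st.2) ++ [ch])
  else
    (false, (if st.1 then st.2 ++ [' '] else st.2) ++ [ch])

-- fused loop body: state = (lastupper, (lastdigit, out))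
def pvStepB (st : Bool × Bool × List Char) (c : Char) : Bool × Bool × List Char :=
  if PySem.Chars.isupper c then
    let st2 := if !st.1 then pvPush st.2 ' ' else st.2
    (true, pvPush st2 c)
  else
    (false, pvPush st.2 c)

def get_subname_parts_py_alt (txt : Option String) : Option String :=
  match txt with
  | none => none
  | some s =>
    if s.toList = [] then some s
    else
      let cs := s.toList
      let r := cs.foldl pvStepB (true, PySem.Chars.isdigit (cs.headD ' '), [])
      some (String.mk r.2.2)

-- ===== PRECONDITION & SPEC =====
def Spec_get_subname_parts_py (txt : Option String) (out : Option String) : Prop := out = get_subname_parts_py_alt txt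
instance (txt : Option String) (out : Option String) : Decidable (Spec_get_subname_parts_py txt out) := by unfold Spec_get_subname_parts_py; infer_instance

-- ===== CLAIM (what is proved, stated in full; the proofs are below) =====
def Claim_equal_get_subname_parts_py : Prop := ∀ (txt : Option String), Dom_get_subname_parts_py txt → Spec_get_subname_parts_py txt (get_subname_parts_py txt)

-- ===== LEMMAS AND PROOFS =====

-- pass-1 emission for one character
def pvEm1 (lu : Bool) (c : Char) : List Char :=
  if PySem.Chars.isupper c then (if lu then [c] else [' ', c]) else [c]

lemma pvStep1_eq (s : Bool) (acc : List Char) (c : Char) :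
    pvStep1 (s, acc) c = (PySem.Chars.isupper c, acc ++ pvEm1 s c) := by
  cases h : PySem.Chars.isupper c <;> cases s <;> simp [pvStep1, pvEm1, h]

lemma pvPush_eq_pvStep2 : pvPush = pvStep2 := rfl

lemma pvStepB_eq (lu : Bool) (st2 : Bool × List Char) (c : Char) :
    pvStepB (lu, st2) c = (PySem.Chars.isupper c, (pvEm1 lu c).foldl pvStep2 st2) := by
  cases h : PySem.Chars.isupper c <;> cases lu <;>
    simp [pvStepB, pvEm1, h, pvPush_eq_pvStep2, List.foldl]

-- the accumulator of pass 1 shifts out of the fold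
lemma pvStep1_shift (cs : List Char) : ∀ (s : Bool) (acc : List Char),
    cs.foldl pvStep1 (s, acc)
      = ((cs.foldl pvStep1 (s, [])).1, acc ++ (cs.foldl pvStep1 (s, [])).2) := by
  induction cs with
  | nil => intro s acc; simp
  | cons c cs ih =>
    intro s acc
    simp only [List.foldl_cons, pvStep1_eq, List.nil_append]
    rw [ih (PySem.Chars.isupper c) (acc ++ pvEm1 s c),
        ih (PySem.Chars.isupper c) (pvEm1 s c)]
    simp [List.append_assoc]

-- the fused loop equals pass 2 run over pass 1's output
lemma pvFuse (cs : List Char) : ∀ (lu : Bool) (st2 : Bool × List Char),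
    cs.foldl pvStepB (lu, st2)
      = ((cs.foldl pvStep1 (lu, [])).1,
         ((cs.foldl pvStep1 (lu, [])).2).foldl pvStep2 st2) := by
  induction cs with
  | nil => intro lu st2; simp
  | cons c cs ih =>
    intro lu st2
    simp only [List.foldl_cons, pvStepB_eq, pvStep1_eq, List.nil_append]
    rw [ih (PySem.Chars.isupper c) ((pvEm1 lu c).foldl pvStep2 st2),
        pvStep1_shift cs (PySem.Chars.isupper c) (pvEm1 lu c)]
    simp [List.foldl_append]

-- ===== VERDICT (by name: the statement is the Claim_ definition above) =====
theorem get_subname_parts_py_spec : Claim_equal_get_subname_parts_py := by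
  intro txt _
  unfold Spec_get_subname_parts_py get_subname_parts_py get_subname_parts_py_alt
  match txt with
  | none => rfl
  | some s =>
    by_cases h : s.toList = []
    · simp [h]
    · simp only [if_neg h]
      rw [pvFuse]
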